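-- pv_equiv track=rewrite | github.com/cloud-VG/leetcode-python | Problems/license _key.py | solution
-- ===== SOURCE A (Python) =====
-- def solution(s: str, k: int) -> str:
--     result = ''
--     length = 0
--     i = len(s) - 1
--     while i >= 0:
--         if s[i] == '-':
--             i -= 1
--         elif length and length % k == 0:
--             result = '-' + result
--             length = 0
--         else:
--             result = s[i].upper() + result
--             length += 1
--             i -= 1
--     return result
-- ===== SOURCE B (Python) =====
-- def solution(s: str, k: int) -> str:
--     cleaned = s.replace('-', '').upper()
--     chunks = []
--     n = len(cleaned)
--     while n > k:
--         chunks.append(cleaned[n - k:n])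
--         n -= k
--     if n > 0:
--         chunks.append(cleaned[:n])
--     return '-'.join(reversed(chunks))
-- ===== Notes on version B (the rewrite author's own statement) =====
-- stated objective: faster
-- what changed: A scans the string backwards character by character with a modulo counter, prepending one char at a time (quadratic string building); B normalizes once with replace/upper and then slices whole k-sized chunks off the right end, joining them with '-'.join (Pre_ restricts to the natural domain k >= 1: k = 0 makes A raise ZeroDivisionError on any string with a non-dash char, and a negative group size is outside the task's domain).
-- outside the precondition, e.g. on solution('a-bc', -2): A returns 'A-BC', B does not finish within the time limit; on solution('ab', 0): A raises ZeroDivisionError, B does not finish within the time limit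
import Mathlib
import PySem

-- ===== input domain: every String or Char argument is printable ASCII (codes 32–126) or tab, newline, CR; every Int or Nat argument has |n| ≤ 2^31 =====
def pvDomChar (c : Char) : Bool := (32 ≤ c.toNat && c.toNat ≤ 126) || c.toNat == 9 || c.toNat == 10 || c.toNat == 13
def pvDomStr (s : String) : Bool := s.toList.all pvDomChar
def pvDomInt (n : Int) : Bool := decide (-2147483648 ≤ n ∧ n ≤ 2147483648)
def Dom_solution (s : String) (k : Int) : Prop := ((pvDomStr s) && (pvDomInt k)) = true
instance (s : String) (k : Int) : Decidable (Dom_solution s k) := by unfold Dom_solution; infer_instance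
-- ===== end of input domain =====

-- B replaces A's backwards char-by-char scan (modulo counter, one-char string prepends)
-- by normalize-once (replace/upper) then slicing whole k-sized chunks off the right end
-- and joining them — measurably faster (no quadratic string prepending); Pre_ restricts
-- to the natural domain 1 <= k (k = 0 makes A raise ZeroDivisionError once a non-dash
-- char is seen; a negative group size is outside the task's domain).


-- ===== PORT A =====
-- A walks index i from len(s)-1 down to 0 (i is unchanged in the dash-insert branch);
-- ported as recursion over s.toList.reverse with the same (length, result) state.
def solutionLoop (k : Int) : List Char → Nat → List Char → List Char
  | [], _, result => result
  | c :: rest, length, result =>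
    if c = '-' then solutionLoop k rest length result
    else if length ≠ 0 ∧ PySem.Int.mod (length : Int) k = 0 then
      solutionLoop k (c :: rest) 0 ('-' :: result)
    else
      solutionLoop k rest (length + 1) (PySem.Chars.upperChar c :: result)
  termination_by l length _ =>
    2 * l.length + (if length ≠ 0 ∧ PySem.Int.mod (length : Int) k = 0 then 1 else 0)
  decreasing_by
    · split_ifs <;> simp <;> omega
    · rename_i h1 h2
      rw [if_pos h2, if_neg (by simp)]
      omega
    · split_ifs <;> simp <;> omega

def solution (s : String) (k : Int) : String :=
  String.mk (solutionLoop k s.toList.reverse 0 [])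

-- ===== PORT B =====
-- the while loop of Source B; the fuel (first Nat) is a totality guard only — with 1 ≤ k the
-- loop exits before u.length iterations (proved below), so behaviour matches Source B on Pre_.
def solutionAltLoop (k : Int) (u : List Char) : Nat → Nat → List (List Char) → List (List Char) × Nat
  | 0, n, chunks => (chunks, n)
  | fuel + 1, n, chunks =>
    if k < (n : Int) then
      solutionAltLoop k u fuel (n - k.toNat)
        (chunks ++ [PySem.List.slice u (some ((n : Int) - k)) (some (n : Int))])
    else (chunks, n)

def solution_alt (s : String) (k : Int) : String :=
  let cleaned := PySem.Str.upper (PySem.Str.replace s "-" "")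
  let u := cleaned.toList
  let r := solutionAltLoop k u u.length u.length []
  let chunks := if 0 < r.2 then r.1 ++ [PySem.List.slice u none (some ((r.2 : Nat) : Int))] else r.1
  String.mk (List.intercalate ['-'] chunks.reverse)

-- ===== PRECONDITION & SPEC =====
-- Pre_ excludes k ≤ 0: for k = 0 A raises ZeroDivisionError on any string containing a
-- non-dash character, and a negative group size is outside the task's natural domain
-- (there A happens to group by |k| while B's loop would not terminate).
def Pre_solution (s : String) (k : Int) : Prop := 1 ≤ k
instance (s : String) (k : Int) : Decidable (Pre_solution s k) := by unfold Pre_solution; infer_instance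

def pvWitness_solution : String × Int := ("2-5g-3-J", 2)

def Spec_solution (s : String) (k : Int) (out : String) : Prop := out = solution_alt s k
instance (s : String) (k : Int) (out : String) : Decidable (Spec_solution s k out) := by unfold Spec_solution; infer_instance

-- ===== CLAIM (what is proved, stated in full; the proofs are below) =====
def Claim_equal_solution : Prop := ∀ (s : String) (k : Int), Dom_solution s k → Pre_solution s k → Spec_solution s k (solution s k)

-- ===== LEMMAS AND PROOFS =====

-- common right-to-left grouping spec: groups of k from the right, first group possibly shorter
def glue (k : Int) (u : List Char) : List Char :=
  if (u.length : Int) ≤ k ∨ k < 1 then u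
  else glue k (u.take (u.length - k.toNat)) ++ '-' :: u.drop (u.length - k.toNat)
  termination_by u.length
  decreasing_by rename_i h; push_neg at h; simp; omega

-- `s.replace('-','')` removes the dashes
lemma replace_go_dash (l acc : List Char) (fuel : Nat) (h : l.length ≤ fuel) :
    PySem.Chars.replace.go ['-'] [] fuel l acc = acc.reverse ++ l.filter (· ≠ '-') := by
  induction fuel generalizing l acc with
  | zero =>
    have : l = [] := by cases l <;> simp_all
    subst this; simp [PySem.Chars.replace.go]
  | succ f ih =>
    cases l with
    | nil => simp [PySem.Chars.replace.go]
    | cons c t =>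
      simp only [PySem.Chars.replace.go, List.isPrefixOf]
      by_cases hc : c = '-'
      · subst hc
        simp only [BEq.rfl, Bool.true_and, List.isPrefixOf, if_pos, List.length_singleton,
          List.drop_one, List.tail_cons, List.reverse_nil, List.nil_append]
        rw [ih _ _ (by simpa using h)]
        simp
      · simp only [show ('-' == c) = false from by simpa using (Ne.symm hc), Bool.false_and,
          Bool.false_eq_true, if_false]
        rw [ih _ _ (by simpa using h)]
        simp [hc]

lemma replace_dash (l : List Char) :
    PySem.Chars.replace l ['-'] [] = l.filter (· ≠ '-') := by
  simp [PySem.Chars.replace]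
  simpa using replace_go_dash l [] l.length le_rfl

-- dash-free, upper-mapped version of A's loop, without the accumulator
def cbuild (k : Int) : List Char → Nat → List Char
  | [], _ => []
  | c :: rest, length =>
    if length ≠ 0 ∧ PySem.Int.mod (length : Int) k = 0 then cbuild k (c :: rest) 0 ++ ['-']
    else cbuild k rest (length + 1) ++ [c]
  termination_by l length =>
    2 * l.length + (if length ≠ 0 ∧ PySem.Int.mod (length : Int) k = 0 then 1 else 0)
  decreasing_by
    · rename_i h; simp [h]
    · rename_i h; split_ifs <;> simp <;> omega

lemma solutionLoop_cbuild (k : Int) :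
    ∀ (l : List Char) (length : Nat) (r : List Char),
      solutionLoop k l length r
        = cbuild k ((l.filter (· ≠ '-')).map PySem.Chars.upperChar) length ++ r := by
  intro l length r
  fun_induction solutionLoop k l length r with
  | case1 _ r => simp [cbuild]
  | case2 rest length r ih =>
    rw [ih]
    rw [show ('-' :: rest).filter (· ≠ '-') = rest.filter (· ≠ '-') by simp [List.filter_cons]]
  | case3 c rest length r hdash hcond ih =>
    rw [ih]
    rw [show ((c :: rest).filter (· ≠ '-')) = c :: rest.filter (· ≠ '-') by
        simp [List.filter_cons, hdash]]
    conv_rhs => rw [List.map_cons, cbuild]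
    rw [if_pos hcond]
    simp
  | case4 c rest length r hdash hcond ih =>
    rw [ih]
    rw [show ((c :: rest).filter (· ≠ '-')) = c :: rest.filter (· ≠ '-') by
        simp [List.filter_cons, hdash]]
    conv_rhs => rw [List.map_cons, cbuild]
    rw [if_neg hcond]
    simp

-- below a full group nothing triggers the dash branch
lemma cbuild_low (k : Int) (hk : 1 ≤ k) :
    ∀ (m l : List Char) (len : Nat), len + m.length ≤ k.toNat →
      cbuild k (m ++ l) len = cbuild k l (len + m.length) ++ m.reverse := by
  intro m
  induction m with
  | nil => intro l len _; simp
  | cons c m' ih =>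
    intro l len hlen
    simp only [List.length_cons] at hlen
    have hcond : ¬ (len ≠ 0 ∧ PySem.Int.mod (len : Int) k = 0) := by
      rintro ⟨hne, hmod⟩
      have hlt : (len : Int) < k := by omega
      rw [PySem.Int.mod_eq_emod_of_pos (by omega : (0 : Int) < k)] at hmod
      rw [Int.emod_eq_of_lt (by omega) hlt] at hmod
      omega
    rw [show (c :: m') ++ l = c :: (m' ++ l) by simp]
    rw [cbuild, if_neg hcond]
    rw [ih l (len + 1) (by omega)]
    simp only [List.reverse_cons, List.length_cons]
    rw [show len + 1 + m'.length = len + (m'.length + 1) by omega]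
    simp

lemma cbuild_glue (k : Int) (hk : 1 ≤ k) :
    ∀ (n : Nat) (u : List Char), u.length ≤ n → cbuild k u.reverse 0 = glue k u := by
  intro n
  induction n with
  | zero =>
    intro u hu
    have : u = [] := by cases u <;> simp_all
    subst this
    rw [glue]; simp [cbuild]; omega
  | succ n ih =>
    intro u hu
    by_cases hle : (u.length : Int) ≤ k
    · have h1 := cbuild_low k hk u.reverse [] 0 (by simp; omega)
      simp at h1
      rw [h1, glue, if_pos (Or.inl hle)]
      simp [cbuild]
    · push_neg at hle
      set t := u.length - k.toNat with ht
      have hbl : (u.drop t).length = k.toNat := by simp [ht]; omega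
      have hsplit : u.reverse = (u.drop t).reverse ++ (u.take t).reverse := by
        rw [← List.reverse_append, List.take_append_drop]
      have h1 := cbuild_low k hk (u.drop t).reverse (u.take t).reverse 0
        (by simp [hbl])
      rw [hsplit, h1]
      simp only [List.length_reverse, hbl, List.reverse_reverse, Nat.zero_add]
      have hat : (u.take t).length = t := by rw [List.length_take]; omega
      have htpos : 1 ≤ t := by omega
      obtain ⟨c, rest, hcr⟩ : ∃ c rest, (u.take t).reverse = c :: rest := by
        cases hx : (u.take t).reverse with
        | nil => exfalso; have := congrArg List.length hx; simp [hat] at this; omega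
        | cons c rest => exact ⟨c, rest, rfl⟩
      have hcond : (k.toNat ≠ 0 ∧ PySem.Int.mod ((k.toNat : Nat) : Int) k = 0) := by
        constructor
        · omega
        · have : ((k.toNat : Nat) : Int) = k := by omega
          rw [this, (PySem.Int.mod_eq_zero_iff_dvd k k)]
      rw [hcr, cbuild, if_pos hcond, ← hcr]
      rw [ih (u.take t) (by omega)]
      conv_rhs => rw [glue]
      rw [if_neg (by rintro (h | h) <;> omega)]
      simp [ht]

-- intercalate peeling for the join of reversed chunks
lemma intercalate_cons_ne_nil (sep x : List Char) (X : List (List Char)) (h : X ≠ []) :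
    List.intercalate sep (x :: X) = x ++ sep ++ List.intercalate sep X := by
  cases X with
  | nil => exact absurd rfl h
  | cons y Y => simp [List.intercalate, List.intersperse]

lemma intercalate_snoc (sep S : List Char) :
    ∀ (X : List (List Char)), X ≠ [] →
      List.intercalate sep (X ++ [S]) = List.intercalate sep X ++ sep ++ S := by
  intro X
  induction X with
  | nil => intro h; exact absurd rfl h
  | cons x X' ih =>
    intro _
    cases hX : X' with
    | nil => simp [List.intercalate, List.intersperse]
    | cons y Y =>
      rw [← hX, List.cons_append, intercalate_cons_ne_nil sep x (X' ++ [S]) (by simp),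
          intercalate_cons_ne_nil sep x X' (by simp [hX]), ih (by simp [hX])]
      simp

-- B's loop: accumulator lemma
lemma altLoop_acc (k : Int) (u : List Char) :
    ∀ (f n : Nat) (ch : List (List Char)),
      (solutionAltLoop k u f n ch).1 = ch ++ (solutionAltLoop k u f n []).1 ∧
      (solutionAltLoop k u f n ch).2 = (solutionAltLoop k u f n []).2 := by
  intro f
  induction f with
  | zero => intro n ch; simp [solutionAltLoop]
  | succ f ih =>
    intro n ch
    by_cases hc : k < (n : Int)
    · simp only [solutionAltLoop, if_pos hc]
      constructor
      · rw [(ih _ _).1, (ih _ (([] : List (List Char)) ++ _)).1]; simp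
      · rw [(ih _ _).2, (ih _ (([] : List (List Char)) ++ _)).2]
    · simp [solutionAltLoop, hc]

-- B's loop leaves a positive residue when it starts positive
lemma altLoop_res_pos (k : Int) (hk : 1 ≤ k) (u : List Char) :
    ∀ (f n : Nat), 1 ≤ n → 1 ≤ (solutionAltLoop k u f n []).2 := by
  intro f
  induction f with
  | zero => intro n hn; simpa [solutionAltLoop] using hn
  | succ f ih =>
    intro n hn
    by_cases hc : k < (n : Int)
    · simp only [solutionAltLoop, if_pos hc]
      rw [(altLoop_acc k u f _ _).2]
      exact ih _ (by omega)
    · simpa [solutionAltLoop, hc] using hn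

lemma altLoop_glue (k : Int) (hk : 1 ≤ k) (u : List Char) :
    ∀ (f n : Nat), n ≤ f → n ≤ u.length →
      List.intercalate ['-']
        ((if 0 < (solutionAltLoop k u f n []).2
          then (solutionAltLoop k u f n []).1 ++ [u.take (solutionAltLoop k u f n []).2]
          else (solutionAltLoop k u f n []).1).reverse)
      = glue k (u.take n) := by
  intro f
  induction f with
  | zero =>
    intro n hf _
    have hn0 : n = 0 := by omega
    subst hn0
    rw [show (if 0 < (solutionAltLoop k u 0 0 []).2
          then (solutionAltLoop k u 0 0 []).1 ++ [u.take (solutionAltLoop k u 0 0 []).2]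
          else (solutionAltLoop k u 0 0 []).1) = ([] : List (List Char)) from rfl]
    rw [show List.take 0 u = [] from rfl, glue,
        if_pos (Or.inl (by rw [List.length_nil]; omega))]
    simp [List.intercalate]
  | succ f ih =>
    intro n hf hn
    by_cases hc : k < (n : Int)
    · have hn1 : (1 : Nat) ≤ n - k.toNat := by omega
      simp only [solutionAltLoop, if_pos hc]
      rw [(altLoop_acc k u f _ _).1, (altLoop_acc k u f _ _).2]
      set S := PySem.List.slice u (some ((n : Int) - k)) (some (n : Int)) with hS
      have hpos := altLoop_res_pos k hk u f (n - k.toNat) hn1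
      rw [if_pos (by omega)]
      rw [show ([] : List (List Char)) ++ [S] ++ (solutionAltLoop k u f (n - k.toNat) []).1
            ++ [u.take (solutionAltLoop k u f (n - k.toNat) []).2]
          = [S] ++ ((solutionAltLoop k u f (n - k.toNat) []).1
            ++ [u.take (solutionAltLoop k u f (n - k.toNat) []).2]) by simp]
      rw [List.reverse_append, List.reverse_singleton]
      rw [intercalate_snoc ['-'] S _ (by simp)]
      have hih := ih (n - k.toNat) (by omega) (by omega)
      rw [if_pos (by omega)] at hih
      rw [hih]
      -- identify S with the last chunk of u.take n
      have hScast : S = (u.drop (n - k.toNat)).take k.toNat := by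
        rw [hS, show ((n : Int) - k) = (((n - k.toNat : Nat) : Nat) : Int) by omega]
        rw [PySem.List.slice_natCast]
        congr 1; omega
      have hlen : (u.take n).length = n := by rw [List.length_take]; omega
      conv_rhs => rw [glue]
      rw [if_neg (by rw [hlen]; rintro (h | h) <;> omega)]
      rw [hlen]
      rw [List.take_take, min_eq_left (by omega)]
      rw [show (u.take n).drop (n - k.toNat) = (u.drop (n - k.toNat)).take (n - (n - k.toNat)) by
        rw [List.drop_take]]
      rw [show n - (n - k.toNat) = k.toNat by omega]
      rw [hScast]
      simp
    · simp only [solutionAltLoop, if_neg hc]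
      by_cases hn0 : 0 < n
      · rw [if_pos hn0]
        have hlt : ((List.take n u).length : Int) ≤ k := by
          have := List.length_take_le n u
          omega
        rw [glue, if_pos (Or.inl hlt)]
        simp [List.intercalate]
      · have hn' : n = 0 := by omega
        subst hn'
        rw [if_neg hn0]
        rw [show List.take 0 u = [] from rfl, glue,
            if_pos (Or.inl (by rw [List.length_nil]; omega))]
        simp [List.intercalate]

-- the cleaned string of B equals the filtered/upper-mapped char list of A
lemma cleaned_eq (s : String) :
    (PySem.Str.upper (PySem.Str.replace s "-" "")).toList
      = (s.toList.filter (· ≠ '-')).map PySem.Chars.upperChar := by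
  rw [PySem.Str.toList_upper, PySem.Str.toList_replace]
  rw [show ("-" : String).toList = ['-'] from rfl, show ("" : String).toList = [] from rfl]
  rw [replace_dash]
  simp [PySem.Chars.upper]

-- ===== VERDICT (by name: the statement is the Claim_ definition above) =====
theorem solution_spec : Claim_equal_solution := by
  intro s k _ hk
  unfold Spec_solution
  have hueq := cleaned_eq s
  set u := (PySem.Str.upper (PySem.Str.replace s "-" "")).toList with hu
  have hlist : solutionLoop k s.toList.reverse 0 []
      = List.intercalate ['-']
          ((if 0 < (solutionAltLoop k u u.length u.length []).2
            then (solutionAltLoop k u u.length u.length []).1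
              ++ [PySem.List.slice u none
                    (some (((solutionAltLoop k u u.length u.length []).2 : Nat) : Int))]
            else (solutionAltLoop k u u.length u.length []).1).reverse) := by
    rw [solutionLoop_cbuild k, List.append_nil]
    rw [show (s.toList.reverse.filter (· ≠ '-')).map PySem.Chars.upperChar = u.reverse by
      rw [hueq, ← List.map_reverse, ← List.filter_reverse]]
    rw [cbuild_glue k hk u.length u le_rfl]
    have hmain := altLoop_glue k hk u u.length u.length le_rfl le_rfl
    rw [List.take_length] at hmain
    rw [PySem.List.slice_to_natCast]
    exact hmain.symm
  exact congrArg String.mk hlist
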